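-- pv_equiv track=rewrite | github.com/pypi-data/pypi-mirror-366 | packages/cortex-memory-sdk/cortex_memory_sdk-2.0.0-py3-none-any.whl/cortex_memory/self_evolving_context.py | _analyze_intent_patterns
-- ===== SOURCE A (Python) =====
-- from typing import List, Dict, Tuple, Optional, Any
--
-- def _analyze_intent_patterns(queries: List[str]) -> Dict:
--     """
--     Analyze intent patterns in queries.
--
--     Args:
--         queries: List of query strings
--
--     Returns:
--         Dict with intent pattern analysis
--     """
--     intents = {
--         'how_to': 0,
--         'what_is': 0,
--         'why_question': 0,
--         'comparison': 0,
--         'troubleshooting': 0,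
--         'best_practice': 0,
--         'implementation': 0
--     }
--
--     intent_keywords = {
--         'how_to': ['how to', 'how do i', 'steps to', 'guide to'],
--         'what_is': ['what is', 'what are', 'define', 'explain'],
--         'why_question': ['why', 'reason', 'cause'],
--         'comparison': ['vs', 'versus', 'compare', 'difference'],
--         'troubleshooting': ['error', 'issue', 'problem', 'fix', 'debug'],
--         'best_practice': ['best', 'recommended', 'practice', 'pattern'],
--         'implementation': ['implement', 'code', 'example', 'sample']
--     }
--
--     for query in queries:
--         query_lower = query.lower()
--
--         for intent, keywords in intent_keywords.items():
--             if any(keyword in query_lower for keyword in keywords):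
--                 intents[intent] += 1
--                 break
--
--     return intents
-- ===== SOURCE B (Python) =====
-- _INTENT_KEYWORDS = [
--     ('how_to', ['how to', 'how do i', 'steps to', 'guide to']),
--     ('what_is', ['what is', 'what are', 'define', 'explain']),
--     ('why_question', ['why', 'reason', 'cause']),
--     ('comparison', ['vs', 'versus', 'compare', 'difference']),
--     ('troubleshooting', ['error', 'issue', 'problem', 'fix', 'debug']),
--     ('best_practice', ['best', 'recommended', 'practice', 'pattern']),
--     ('implementation', ['implement', 'code', 'example', 'sample']),
-- ]
--
-- def _analyze_intent_patterns(queries):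
--     # Sieve: each category, in table order, peels its matching queries off the
--     # remaining pool; a query therefore counts for the first category matching it.
--     remaining = [q.lower() for q in queries]
--     result = {}
--     for intent, kws in _INTENT_KEYWORDS:
--         matched, unmatched = [], []
--         for q in remaining:
--             (matched if any(kw in q for kw in kws) else unmatched).append(q)
--         result[intent] = len(matched)
--         remaining = unmatched
--     return result
-- ===== Notes on version B (the rewrite author's own statement) =====
-- stated objective: alternative
-- what changed: Transposed the loop nesting into a sieve: instead of classifying each query with an inner break over the category table, B iterates categories in the outer loop and each category partitions the remaining query pool into matched (its count) and unmatched (passed to later categories), so first-match semantics comes from progressive filtering rather than break.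
import Mathlib
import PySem

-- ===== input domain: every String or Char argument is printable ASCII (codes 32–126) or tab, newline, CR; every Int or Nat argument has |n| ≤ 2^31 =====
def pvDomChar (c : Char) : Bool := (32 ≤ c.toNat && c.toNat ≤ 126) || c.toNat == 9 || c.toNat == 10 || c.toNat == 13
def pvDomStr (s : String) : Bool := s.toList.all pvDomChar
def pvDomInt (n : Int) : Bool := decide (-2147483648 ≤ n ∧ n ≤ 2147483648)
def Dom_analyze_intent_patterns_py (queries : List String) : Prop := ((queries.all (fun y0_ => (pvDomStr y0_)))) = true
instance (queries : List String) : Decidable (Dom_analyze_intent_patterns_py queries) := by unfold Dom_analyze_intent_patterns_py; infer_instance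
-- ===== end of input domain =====

-- B transposes A's loop nesting into a category-outer sieve (each category partitions the
-- remaining query pool into matched/unmatched) instead of per-query classify-and-break; alternative, same cost.


-- ===== PORT A =====
-- the intent_keywords table, in its fixed order (shared literal constant of both sources)
def pvKwTable : List (String × List String) :=
  [("how_to", ["how to", "how do i", "steps to", "guide to"]),
   ("what_is", ["what is", "what are", "define", "explain"]),
   ("why_question", ["why", "reason", "cause"]),
   ("comparison", ["vs", "versus", "compare", "difference"]),
   ("troubleshooting", ["error", "issue", "problem", "fix", "debug"]),
   ("best_practice", ["best", "recommended", "practice", "pattern"]),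
   ("implementation", ["implement", "code", "example", "sample"])]

-- A's initial `intents` dict literal
def pvInitIntents : PySem.Dict String Int :=
  PySem.Dict.ofList
    [("how_to", 0), ("what_is", 0), ("why_question", 0), ("comparison", 0),
     ("troubleshooting", 0), ("best_practice", 0), ("implementation", 0)]

-- `any(keyword in query_lower for keyword in keywords)` (shared by both sources)
def pvMatch (kws : List String) (q : String) : Bool := kws.any (fun kw => PySem.Str.isIn kw q)

-- A's inner `for intent, keywords in intent_keywords.items(): if any(...): intents[intent] += 1; break`
def pvLoopA (intents : PySem.Dict String Int) (ql : String) :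
    List (String × List String) → PySem.Dict String Int
  | [] => intents
  | (intent, kws) :: rest =>
    if pvMatch kws ql then intents.modify intent 0 (· + 1)
    else pvLoopA intents ql rest

def analyze_intent_patterns_py (queries : List String) : List (String × Int) :=
  (queries.foldl
    (fun intents query => pvLoopA intents (PySem.Str.lower query) pvKwTable)
    pvInitIntents).items

-- ===== PORT B =====
-- B's outer loop over categories: partition the remaining pool, record the matched count,
-- pass the unmatched queries on to the later categories.
def pvSieve : List (String × List String) → List String → List (String × Int)
  | [], _ => []
  | (intent, kws) :: rest, remaining =>
    let pr := remaining.partition (pvMatch kws)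
    (intent, (pr.1.length : Int)) :: pvSieve rest pr.2

def analyze_intent_patterns_py_alt (queries : List String) : List (String × Int) :=
  pvSieve pvKwTable (queries.map PySem.Str.lower)

-- ===== PRECONDITION & SPEC =====
def Spec_analyze_intent_patterns_py (queries : List String) (out : List (String × Int)) : Prop := out = analyze_intent_patterns_py_alt queries
instance (queries : List String) (out : List (String × Int)) : Decidable (Spec_analyze_intent_patterns_py queries out) := by unfold Spec_analyze_intent_patterns_py; infer_instance

-- ===== CLAIM (what is proved, stated in full; the proofs are below) =====
def Claim_equal_analyze_intent_patterns_py : Prop := ∀ (queries : List String), Dom_analyze_intent_patterns_py queries → Spec_analyze_intent_patterns_py queries (analyze_intent_patterns_py queries)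

-- ===== LEMMAS AND PROOFS =====

-- first intent of table t whose keyword list matches the (already lowered) query, else none (proof-only)
def pvFirst (t : List (String × List String)) (q : String) : Option String :=
  (t.find? (fun p => pvMatch p.2 q)).map Prod.fst

-- the classification A effectively assigns to a raw query (proof-only)
def pvClassify (query : String) : Option String := pvFirst pvKwTable (PySem.Str.lower query)

-- A's per-query effect on the dict, as a function of the query's classification (proof-only)
def pvStep (d : PySem.Dict String Int) : Option String → PySem.Dict String Int
  | none => d
  | some j => d.modify j 0 (· + 1)

-- A's break-loop over a keyword table is: modify at the first matching intent, if any
theorem pvLoopA_eq (d : PySem.Dict String Int) (ql : String)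
    (t : List (String × List String)) :
    pvLoopA d ql t = pvStep d (pvFirst t ql) := by
  induction t with
  | nil => rfl
  | cons hd tl ih =>
    obtain ⟨intent, kws⟩ := hd
    by_cases h : pvMatch kws ql = true
    · simp only [pvLoopA, pvFirst, List.find?, h, if_true, Option.map_some]
      rfl
    · rw [Bool.not_eq_true] at h
      simp only [pvLoopA, pvFirst, List.find?, h, Bool.false_eq_true, if_false, ih]

-- folding A's per-query step starting from d adds, at each key, the number of queries classified to it
theorem getD_stepfold (l : List (Option String)) (d : PySem.Dict String Int) (k : String) :
    (l.foldl pvStep d).getD k 0 = d.getD k 0 + l.count (some k) := by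
  induction l generalizing d with
  | nil => simp
  | cons o tl ih =>
    cases o with
    | none => simp [pvStep, ih]
    | some j =>
      simp only [List.foldl_cons, pvStep, ih, PySem.Dict.getD_modify, List.count_cons]
      by_cases hk : k = j
      · subst hk; simp; omega
      · simp [hk, Ne.symm]

-- the fold keeps the key list of any dict already containing every classified key
theorem keys_stepfold (l : List (Option String)) (d : PySem.Dict String Int)
    (h : ∀ j, some j ∈ l → d.contains j = true) :
    (l.foldl pvStep d).keys = d.keys := by
  induction l generalizing d with
  | nil => simp
  | cons o tl ih =>
    cases o with
    | none =>
      simp only [List.foldl_cons, pvStep]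
      exact ih d (fun j hj => h j (List.mem_cons_of_mem _ hj))
    | some j =>
      simp only [List.foldl_cons, pvStep]
      have hcj : d.contains j = true := h j (List.mem_cons_self)
      rw [ih _ (fun j' hj' => by
        rw [PySem.Dict.contains_modify]
        have hc := h j' (List.mem_cons_of_mem _ hj')
        simp [hc])]
      rw [PySem.Dict.keys_modify, PySem.Dict.keys_insert_of_contains _ _ hcj]

-- every classification is a key of the seven-key table / initial dict
theorem classify_mem_keys (q : String) (j : String) (hj : pvClassify q = some j) :
    j ∈ pvInitIntents.keys := by
  unfold pvClassify pvFirst at hj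
  simp only [Option.map_eq_some_iff] at hj
  obtain ⟨p, hp, rfl⟩ := hj
  have hmem : p ∈ pvKwTable := List.mem_of_find?_eq_some hp
  have : p.1 ∈ pvKwTable.map Prod.fst := List.mem_map_of_mem hmem
  have hkeys : pvKwTable.map Prod.fst = pvInitIntents.keys := by decide
  rwa [hkeys] at this

-- a later table entry never carries the head's intent
theorem first_ne_of_not_mem (tl : List (String × List String)) (q intent : String)
    (hnotin : intent ∉ tl.map Prod.fst) : pvFirst tl q ≠ some intent := by
  intro hc
  unfold pvFirst at hc
  simp only [Option.map_eq_some_iff] at hc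
  obtain ⟨p, hp, hfst⟩ := hc
  exact hnotin (hfst ▸ List.mem_map_of_mem (List.mem_of_find?_eq_some hp))

-- B's sieve over a nodup-keyed table computes, per category, the number of pool
-- elements whose first match in the whole table is that category
theorem sieve_eq (t : List (String × List String)) (r : List String)
    (hnd : (t.map Prod.fst).Nodup) :
    pvSieve t r
      = t.map (fun p => (p.1, ((r.filter (fun q => pvFirst t q = some p.1)).length : Int))) := by
  induction t generalizing r with
  | nil => rfl
  | cons hd tl ih =>
    obtain ⟨intent, kws⟩ := hd
    rw [List.map_cons, List.nodup_cons] at hnd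
    obtain ⟨hnotin, hndtl⟩ := hnd
    show (intent, ((r.partition (pvMatch kws)).1.length : Int))
        :: pvSieve tl (r.partition (pvMatch kws)).2 = _
    rw [List.partition_eq_filter_filter, List.map_cons]
    simp only []
    congr 1
    · -- head: first match is this intent ↔ this category's keywords match
      congr 2
      apply congrArg List.length
      apply List.filter_congr
      intro q _
      by_cases h : pvMatch kws q = true
      · simp [pvFirst, h]
      · rw [Bool.not_eq_true] at h
        have hskip : pvFirst ((intent, kws) :: tl) q = pvFirst tl q := by
          simp [pvFirst, h]
        rw [h, hskip]
        exact (decide_eq_false (first_ne_of_not_mem tl q intent hnotin)).symm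
    · -- tail: filtering against the whole table = filtering the unmatched pool against the tail
      rw [ih _ hndtl]
      apply List.map_congr_left
      intro p hp
      congr 2
      rw [List.filter_filter]
      apply congrArg List.length
      apply List.filter_congr
      intro q _
      by_cases h : pvMatch kws q = true
      · have hne : p.1 ≠ intent := by
          intro he
          apply hnotin
          rw [← he]
          exact List.mem_map_of_mem (a := p) hp
        simp [pvFirst, h, Ne.symm hne]
      · rw [Bool.not_eq_true] at h
        simp [pvFirst, h]

-- counting a classification over the queries = length of the matching lowered-pool filter
theorem count_classify (queries : List String) (k : String) :
    (queries.map pvClassify).count (some k)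
      = ((queries.map PySem.Str.lower).filter (fun q => pvFirst pvKwTable q = some k)).length := by
  rw [List.count, List.countP_map, ← List.countP_eq_length_filter, List.countP_map]
  apply List.countP_congr
  intro q _
  simp [pvClassify, Function.comp]

-- the seven-key initial dict is zero at every table key
theorem init_getD_zero : ∀ k ∈ pvKwTable.map Prod.fst, pvInitIntents.getD k 0 = 0 := by decide

-- ===== VERDICT (by name: the statement is the Claim_ definition above) =====
theorem analyze_intent_patterns_py_spec : Claim_equal_analyze_intent_patterns_py := by
  intro queries _
  unfold Spec_analyze_intent_patterns_py analyze_intent_patterns_py analyze_intent_patterns_py_alt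
  have hstep : (fun (d : PySem.Dict String Int) (q : String) =>
      pvLoopA d (PySem.Str.lower q) pvKwTable)
      = (fun d q => pvStep d (pvClassify q)) := by
    funext d q
    rw [pvLoopA_eq]; rfl
  rw [hstep, ← List.foldl_map (f := pvClassify) (g := pvStep)]
  have hkeys := keys_stepfold (queries.map pvClassify) pvInitIntents (by
    intro j hj
    simp only [List.mem_map] at hj
    obtain ⟨q, _, hq⟩ := hj
    rw [PySem.Dict.contains_iff_mem_keys]
    exact classify_mem_keys q j hq)
  have hnd : ((queries.map pvClassify).foldl pvStep pvInitIntents).keys.Nodup := by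
    rw [hkeys]; decide
  rw [PySem.Dict.items_eq_map_keys _ hnd 0, hkeys]
  have hlit : pvInitIntents.keys = pvKwTable.map Prod.fst := by decide
  rw [hlit, sieve_eq pvKwTable _ (by decide), List.map_map]
  apply List.map_congr_left
  intro p hp
  simp only [Function.comp]
  congr 1
  rw [getD_stepfold, init_getD_zero p.1 (List.mem_map_of_mem hp), zero_add,
    count_classify]
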